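-- pv_equiv track=rewrite | github.com/amiadeo/amiado-songs-site | scripts/chord-agent/agent_free.py | best_capo
-- ===== SOURCE A (Python) =====
-- NOTES = ['C', 'C#', 'D', 'D#', 'E', 'F', 'F#', 'G', 'G#', 'A', 'A#', 'B']
--
-- FLAT_NAMES = {
--     'C#': 'Db', 'D#': 'Eb', 'F#': 'F#', 'G#': 'Ab', 'A#': 'Bb',
-- }
--
-- EASY_CHORDS = {'C', 'D', 'Dm', 'E', 'Em', 'G', 'A', 'Am', 'F', 'Bm', 'B'}
--
-- def pretty(chord: str) -> str:
--     """Normalise chord name: prefer flat names (Bb over A#, Eb over D#)."""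
--     if chord.endswith('m'):
--         root, suffix = chord[:-1], 'm'
--     else:
--         root, suffix = chord, ''
--     root = FLAT_NAMES.get(root, root)
--     return root + suffix
--
-- def transpose_chord(chord: str, semitones: int) -> str:
--     """Transpose a chord DOWN by `semitones` (capo raises pitch, so we go down)."""
--     if chord.endswith('m'):
--         root, suffix = chord[:-1], 'm'
--     else:
--         root, suffix = chord, ''
--     # Resolve flat names back to sharp for indexing
--     SHARP = {'Db':'C#','Eb':'D#','Gb':'F#','Ab':'G#','Bb':'A#'}
--     root = SHARP.get(root, root)
--     if root not in NOTES:
--         return chord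
--     idx     = NOTES.index(root)
--     new_idx = (idx - semitones) % 12
--     return pretty(f"{NOTES[new_idx]}{suffix}")
--
-- def best_capo(chords: list[str]) -> tuple[int, list[str]]:
--     """
--     Try capo 0-7. Return (capo_fret, transposed_chords) that maximises
--     the number of easy open-chord shapes.
--     """
--     best_fret, best_list, best_score = 0, chords, -1
--
--     for capo in range(8):
--         transposed = [transpose_chord(c, capo) for c in chords]
--         score      = sum(1 for c in transposed if c in EASY_CHORDS)
--         if score > best_score:
--             best_score = score
--             best_fret  = capo
--             best_list  = transposed
--
--     return best_fret, best_list
-- ===== SOURCE B (Python) =====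
-- NOTES = ['C', 'C#', 'D', 'D#', 'E', 'F', 'F#', 'G', 'G#', 'A', 'A#', 'B']
--
-- FLAT_NAMES = {
--     'C#': 'Db', 'D#': 'Eb', 'F#': 'F#', 'G#': 'Ab', 'A#': 'Bb',
-- }
--
-- SHARP = {'Db':'C#','Eb':'D#','Gb':'F#','Ab':'G#','Bb':'A#'}
--
-- # Note indices whose transposed shape is an easy open chord
-- EASY_MAJOR_IDX = (0, 2, 4, 5, 7, 9, 11)   # C D E F G A B
-- EASY_MINOR_IDX = (2, 4, 9, 11)            # Dm Em Am Bm
--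
-- def pretty(chord: str) -> str:
--     if chord.endswith('m'):
--         root, suffix = chord[:-1], 'm'
--     else:
--         root, suffix = chord, ''
--     root = FLAT_NAMES.get(root, root)
--     return root + suffix
--
-- def transpose_chord(chord: str, semitones: int) -> str:
--     if chord.endswith('m'):
--         root, suffix = chord[:-1], 'm'
--     else:
--         root, suffix = chord, ''
--     root = SHARP.get(root, root)
--     if root not in NOTES:
--         return chord
--     idx     = NOTES.index(root)
--     new_idx = (idx - semitones) % 12
--     return pretty(f"{NOTES[new_idx]}{suffix}")
--
-- def _parse(chord):
--     """(note_index, is_minor) for a recognizable chord, else None."""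
--     if chord.endswith('m'):
--         root, minor = chord[:-1], True
--     else:
--         root, minor = chord, False
--     root = SHARP.get(root, root)
--     if root in NOTES:
--         return NOTES.index(root), minor
--     return None
--
-- def best_capo(chords: list[str]) -> tuple[int, list[str]]:
--     # Parse each chord once to a (note-index, minor?) pair; score capos by pure
--     # index arithmetic; then select the lowest best capo and transpose once.
--     parsed = [p for p in map(_parse, chords) if p is not None]
--     scores = [sum(1 for (i, minor) in parsed
--                   if ((i - k) % 12) in (EASY_MINOR_IDX if minor else EASY_MAJOR_IDX))
--               for k in range(8)]
--     best_fret = scores.index(max(scores))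
--     return best_fret, [transpose_chord(c, best_fret) for c in chords]
-- ===== Notes on version B (the rewrite author's own statement) =====
-- stated objective: alternative
-- what changed: Instead of A's running best over 8 rebuilt-and-scored transposed string lists, B parses each chord once into a (note-index, is-minor) pair, scores every capo by pure integer arithmetic against fixed easy-index tables, picks the lowest capo attaining the maximum via scores.index(max(scores)), and transposes the chord list once at the end.
import Mathlib
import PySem

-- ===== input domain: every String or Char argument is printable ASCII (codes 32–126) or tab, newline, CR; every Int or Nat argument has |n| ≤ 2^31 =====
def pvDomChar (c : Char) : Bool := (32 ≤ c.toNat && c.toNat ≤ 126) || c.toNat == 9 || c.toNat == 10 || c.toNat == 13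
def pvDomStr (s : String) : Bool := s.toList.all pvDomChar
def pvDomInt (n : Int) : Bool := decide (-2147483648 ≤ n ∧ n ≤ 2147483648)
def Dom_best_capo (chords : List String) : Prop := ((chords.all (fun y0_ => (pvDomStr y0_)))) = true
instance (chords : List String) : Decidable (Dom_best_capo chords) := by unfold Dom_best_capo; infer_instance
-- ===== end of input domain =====

-- B replaces A's running best over 8 rebuilt-and-scored transposed string lists with a
-- parse-once pass to (note-index, minor?) pairs, pure integer-index scoring against fixed
-- easy-index tables, index-of-max selection, and a single final transposition.

-- ===== PORT A =====
def NOTES : List String := ["C", "C#", "D", "D#", "E", "F", "F#", "G", "G#", "A", "A#", "B"]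

def FLAT_NAMES : PySem.Dict String String :=
  PySem.Dict.ofList [("C#", "Db"), ("D#", "Eb"), ("F#", "F#"), ("G#", "Ab"), ("A#", "Bb")]

def EASY_CHORDS : PySem.Set String :=
  PySem.Set.ofList ["C", "D", "Dm", "E", "Em", "G", "A", "Am", "F", "Bm", "B"]

-- Python str concatenation root + suffix; exact (code-point list append)
def strConcat (a b : String) : String := String.ofList (a.toList ++ b.toList)

def pretty (chord : String) : String :=
  let rs := if PySem.Str.endswith chord "m" then (PySem.Str.slice chord none (some (-1)), "m")
            else (chord, "")
  let root := FLAT_NAMES.getD rs.1 rs.1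
  strConcat root rs.2

def SHARP : PySem.Dict String String :=
  PySem.Dict.ofList [("Db", "C#"), ("Eb", "D#"), ("Gb", "F#"), ("Ab", "G#"), ("Bb", "A#")]

def transpose_chord (chord : String) (semitones : Int) : String :=
  let rs := if PySem.Str.endswith chord "m" then (PySem.Str.slice chord none (some (-1)), "m")
            else (chord, "")
  let root := SHARP.getD rs.1 rs.1
  if NOTES.contains root = false then chord
  else
    -- NOTES.index(root): guarded by the membership test above, so index? is some
    let idx : Int := (((PySem.List.index? NOTES root).getD 0 : Nat) : Int)
    let new_idx := PySem.Int.mod (idx - semitones) 12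
    -- NOTES[new_idx]: 0 ≤ new_idx < 12 = len NOTES, so pyGet? is some
    pretty (strConcat ((PySem.List.pyGet? NOTES new_idx).getD "") rs.2)

def best_capo (chords : List String) : Int × List String :=
  let st := (PySem.List.pyRange 0 8 1).foldl
    (fun st capo =>
      let transposed := chords.map (fun c => transpose_chord c capo)
      let score : Int := transposed.foldl
        (fun acc c => if PySem.Set.contains EASY_CHORDS c then acc + 1 else acc) 0
      if score > st.2.2 then (capo, transposed, score) else st)
    ((0 : Int), chords, (-1 : Int))
  (st.1, st.2.1)

-- ===== PORT B =====
-- note indices whose transposed shape is an easy open chord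
def EASY_MAJOR_IDX : List Int := [0, 2, 4, 5, 7, 9, 11]   -- C D E F G A B
def EASY_MINOR_IDX : List Int := [2, 4, 9, 11]            -- Dm Em Am Bm

-- _parse: (note_index, is_minor) for a recognizable chord, else None
def parseChord (chord : String) : Option (Int × Bool) :=
  let rm := if PySem.Str.endswith chord "m" then (PySem.Str.slice chord none (some (-1)), true)
            else (chord, false)
  let root := SHARP.getD rm.1 rm.1
  if NOTES.contains root then
    -- NOTES.index(root): guarded by the membership test, so index? is some
    some ((((PySem.List.index? NOTES root).getD 0 : Nat) : Int), rm.2)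
  else none

def best_capo_alt (chords : List String) : Int × List String :=
  let parsed : List (Int × Bool) := (chords.map parseChord).filterMap id
  let scores : List Int := (PySem.List.pyRange 0 8 1).map (fun k =>
    parsed.foldl
      (fun acc p =>
        if (if p.2 then EASY_MINOR_IDX else EASY_MAJOR_IDX).contains (PySem.Int.mod (p.1 - k) 12)
        then acc + 1 else acc) 0)
  -- max(scores): scores is nonempty; scores.index(m): m ∈ scores, so index? is some
  let m : Int := (PySem.List.max? scores (fun x => x)).getD 0
  let best_fret : Int := (((PySem.List.index? scores m).getD 0 : Nat) : Int)
  (best_fret, chords.map (fun c => transpose_chord c best_fret))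

-- ===== PRECONDITION & SPEC =====
def Spec_best_capo (chords : List String) (out : Int × List String) : Prop := out = best_capo_alt chords
instance (chords : List String) (out : Int × List String) : Decidable (Spec_best_capo chords out) := by unfold Spec_best_capo; infer_instance

-- ===== CLAIM (what is proved, stated in full; the proofs are below) =====
def Claim_equal_best_capo : Prop := ∀ (chords : List String), Dom_best_capo chords → Spec_best_capo chords (best_capo chords)

-- ===== LEMMAS AND PROOFS =====

-- score of capo k on a chord list (A's notion: transposed name lies in EASY_CHORDS)
-- score of capo k on a chord list (A's notion: transposed name lies in EASY_CHORDS)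
def cnt (chords : List String) (k : Int) : Int :=
  (chords.countP (fun c => PySem.Set.contains EASY_CHORDS (transpose_chord c k)) : Nat)

lemma cnt_nonneg (chords : List String) (k : Int) : 0 ≤ cnt chords k := by
  unfold cnt; positivity

lemma mod12_nonneg (a : Int) : 0 ≤ PySem.Int.mod a 12 := by
  rw [PySem.Int.mod_eq_emod_of_pos (by norm_num)]; omega

lemma mod12_lt (a : Int) : PySem.Int.mod a 12 < 12 := by
  rw [PySem.Int.mod_eq_emod_of_pos (by norm_num)]; omega

-- for an in-range note index j, easiness of the pretty-printed name = table membership of j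
lemma easy_table (j : Int) (h0 : 0 ≤ j) (h1 : j < 12) (minor : Bool) :
    PySem.Set.contains EASY_CHORDS
      (pretty (strConcat ((PySem.List.pyGet? NOTES j).getD "") (if minor then "m" else "")))
    = (if minor then EASY_MINOR_IDX else EASY_MAJOR_IDX).contains j := by
  interval_cases j <;> cases minor <;> rfl

lemma easy_branch_m (idx k : Int) :
    EASY_MINOR_IDX.contains (PySem.Int.mod (idx - k) 12)
    = PySem.Set.contains EASY_CHORDS
        (pretty (strConcat ((PySem.List.pyGet? NOTES (PySem.Int.mod (idx - k) 12)).getD "") "m")) := by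
  simpa using (easy_table _ (mod12_nonneg _) (mod12_lt _) true).symm

lemma easy_branch_M (idx k : Int) :
    EASY_MAJOR_IDX.contains (PySem.Int.mod (idx - k) 12)
    = PySem.Set.contains EASY_CHORDS
        (pretty (strConcat ((PySem.List.pyGet? NOTES (PySem.Int.mod (idx - k) 12)).getD "") "")) := by
  simpa using (easy_table _ (mod12_nonneg _) (mod12_lt _) false).symm

-- every easy chord name has a recognizable root
lemma easy_root' : ∀ c ∈ (["C", "D", "Dm", "E", "Em", "G", "A", "Am", "F", "Bm", "B"] : List String),
    NOTES.contains (SHARP.getD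
      (if PySem.Str.endswith c "m" then PySem.Str.slice c none (some (-1)) else c)
      (if PySem.Str.endswith c "m" then PySem.Str.slice c none (some (-1)) else c)) = true := by
  decide

lemma easy_root (c : String) (h : PySem.Set.contains EASY_CHORDS c = true) :
    NOTES.contains (SHARP.getD
      (if PySem.Str.endswith c "m" then PySem.Str.slice c none (some (-1)) else c)
      (if PySem.Str.endswith c "m" then PySem.Str.slice c none (some (-1)) else c)) = true := by
  refine easy_root' c ?_
  have h2 : c ∈ EASY_CHORDS := by simpa [PySem.Set.contains] using h
  rw [show EASY_CHORDS = ["C", "D", "Dm", "E", "Em", "G", "A", "Am", "F", "Bm", "B"]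
      from by decide] at h2
  exact h2

-- B's arithmetic test on the parsed chord = A's membership test on the transposed name
set_option maxHeartbeats 2000000 in
lemma predB_eq (k : Int) (c : String) :
    ((parseChord c).map
      (fun p => (if p.2 then EASY_MINOR_IDX else EASY_MAJOR_IDX).contains
        (PySem.Int.mod (p.1 - k) 12))).getD false
    = PySem.Set.contains EASY_CHORDS (transpose_chord c k) := by
  simp only [parseChord, transpose_chord]
  split_ifs <;>
    first
    | (exfalso; simp_all; done)
    | (by_cases he : PySem.Set.contains EASY_CHORDS c = true
       · exfalso
         have hr := easy_root c he
         simp_all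
         done
       · simp only [Option.map_none, Option.getD_none]
         symm
         simpa using he)
    | exact easy_branch_m _ k
    | exact easy_branch_M _ k

-- countP through the parse-then-filter pass
lemma countP_parse (chords : List String) (p : Int × Bool → Bool) :
    ((chords.map parseChord).filterMap id).countP p
    = chords.countP (fun c => ((parseChord c).map p).getD false) := by
  induction chords with
  | nil => rfl
  | cons x xs ih =>
      simp only [List.map_cons, List.filterMap_cons]
      cases h : parseChord x
      · simpa [h] using ih
      · simpa [h, List.countP_cons] using ih

-- B's score entry for capo k is A's count
lemma scoreB_eq (chords : List String) (k : Int) :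
    ((chords.map parseChord).filterMap id).foldl
      (fun acc p =>
        if (if p.2 then EASY_MINOR_IDX else EASY_MAJOR_IDX).contains (PySem.Int.mod (p.1 - k) 12)
        then acc + 1 else acc) 0
    = cnt chords k := by
  rw [PySem.List.foldl_if_add_one, zero_add]
  unfold cnt
  congr 1
  rw [countP_parse]
  exact List.countP_congr (fun c _ => by rw [predB_eq k c])

-- A's inner score sum is the same count
lemma scoreA_eq (chords : List String) (k : Int) :
    (chords.map (fun c => transpose_chord c k)).foldl
      (fun acc c => if PySem.Set.contains EASY_CHORDS c then acc + 1 else acc) 0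
    = cnt chords k := by
  rw [PySem.List.foldl_if_add_one, List.countP_map, zero_add]
  simp [cnt, Function.comp_def]

lemma pyRange8 : PySem.List.pyRange 0 8 1 = [0, 1, 2, 3, 4, 5, 6, 7] := by decide

-- A's fold with the payload (transposed list) peeled off into a pair fold
lemma payload_fold (caps : List Int) (chords : List String) (f0 s0 : Int) :
    (caps.foldl
      (fun st capo =>
        if cnt chords capo > st.2.2 then
          (capo, chords.map (fun c => transpose_chord c capo), cnt chords capo)
        else st)
      (f0, chords.map (fun c => transpose_chord c f0), s0))
    = ((caps.foldl (fun q capo => if cnt chords capo > q.2 then (capo, cnt chords capo) else q) (f0, s0)).1,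
       chords.map (fun c => transpose_chord c
         (caps.foldl (fun q capo => if cnt chords capo > q.2 then (capo, cnt chords capo) else q) (f0, s0)).1),
       (caps.foldl (fun q capo => if cnt chords capo > q.2 then (capo, cnt chords capo) else q) (f0, s0)).2) := by
  induction caps generalizing f0 s0 with
  | nil => rfl
  | cons c rest ih =>
      simp only [List.foldl_cons]
      split_ifs with h
      · exact ih c (cnt chords c)
      · exact ih f0 s0

-- running max bounds
lemma le_foldl_max' (t : List Int) (s : Int) : s ≤ t.foldl max s := by
  induction t generalizing s with
  | nil => simp
  | cons v r ih => exact le_trans (le_max_left s v) (ih (max s v))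

lemma foldl_max_mem (t : List Int) (s : Int) : t.foldl max s = s ∨ t.foldl max s ∈ t := by
  induction t generalizing s with
  | nil => simp
  | cons v r ih =>
      rw [List.foldl_cons]
      rcases ih (max s v) with h | h
      · rw [h]
        by_cases hv : v ≤ s
        · left; omega
        · right
          have hmv : max s v = v := by omega
          rw [hmv]
          exact List.mem_cons_self
      · right; exact List.mem_cons_of_mem _ h

-- indexed pairs (k, v), indices counting up from k
def enumI (k : Int) (vs : List Int) : List (Int × Int) :=
  match vs with
  | [] => []
  | v :: t => (k, v) :: enumI (k + 1) t

-- strict-> running best over indexed pairs = first index of the maximum (if it beats the seed)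
lemma sel_fold (vs : List Int) (k f s : Int) :
    ((enumI k vs).foldl (fun q p => if p.2 > q.2 then p else q) (f, s)).1
    = if vs.foldl max s > s
      then k + (((PySem.List.index? vs (vs.foldl max s)).getD 0 : Nat) : Int)
      else f := by
  induction vs generalizing k f s with
  | nil => simp [enumI]
  | cons v t ih =>
      simp only [enumI, List.foldl_cons]
      by_cases hv : v > s
      · rw [if_pos hv, ih (k + 1) k v, show max s v = v from by omega]
        have hge : v ≤ t.foldl max v := le_foldl_max' t v
        rw [if_pos (show t.foldl max v > s from by omega)]
        by_cases hMv : t.foldl max v > v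
        · rw [if_pos hMv]
          have hmem : t.foldl max v ∈ t := by
            rcases foldl_max_mem t v with h | h
            · omega
            · exact h
          rw [PySem.List.index?_cons_of_ne t (show v ≠ t.foldl max v from by omega)]
          obtain ⟨n, hn⟩ := Option.isSome_iff_exists.mp
            ((PySem.List.index?_isSome_iff t _).mpr hmem)
          rw [hn]
          simp only [Option.map_some, Option.getD_some]
          omega
        · rw [if_neg hMv, show t.foldl max v = v from by omega, PySem.List.index?_cons_self]
          simp
      · rw [if_neg hv, ih (k + 1) f s, show max s v = s from by omega]
        by_cases hMs : t.foldl max s > s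
        · rw [if_pos hMs, if_pos hMs]
          have hmem : t.foldl max s ∈ t := by
            rcases foldl_max_mem t s with h | h
            · omega
            · exact h
          rw [PySem.List.index?_cons_of_ne t (show v ≠ t.foldl max s from by omega)]
          obtain ⟨n, hn⟩ := Option.isSome_iff_exists.mp
            ((PySem.List.index?_isSome_iff t _).mpr hmem)
          rw [hn]
          simp only [Option.map_some, Option.getD_some]
          omega
        · rw [if_neg hMs, if_neg hMs]

set_option maxHeartbeats 1000000 in
theorem best_capo_eq_alt (chords : List String) : best_capo chords = best_capo_alt chords := by
  simp only [best_capo, best_capo_alt]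
  rw [pyRange8]
  simp only [List.map_cons, List.map_nil, scoreB_eq, scoreA_eq]
  rw [List.foldl_cons]
  have h0 : cnt chords 0 > ((0 : Int), chords, (-1 : Int)).2.2 := by
    have := cnt_nonneg chords 0
    simp only []
    omega
  rw [if_pos h0]
  rw [payload_fold [1, 2, 3, 4, 5, 6, 7] chords 0 (cnt chords 0)]
  have hmap : enumI 1 [cnt chords 1, cnt chords 2, cnt chords 3, cnt chords 4,
      cnt chords 5, cnt chords 6, cnt chords 7]
      = ([1, 2, 3, 4, 5, 6, 7] : List Int).map (fun c => (c, cnt chords c)) := rfl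
  have hfold : ([1, 2, 3, 4, 5, 6, 7] : List Int).foldl
      (fun q capo => if cnt chords capo > q.2 then (capo, cnt chords capo) else q)
      ((0 : Int), cnt chords 0)
      = (enumI 1 [cnt chords 1, cnt chords 2, cnt chords 3, cnt chords 4,
          cnt chords 5, cnt chords 6, cnt chords 7]).foldl
          (fun q p => if p.2 > q.2 then p else q) ((0 : Int), cnt chords 0) := by
    rw [hmap, List.foldl_map]
  rw [hfold, sel_fold]
  rw [PySem.List.max?_id_cons]
  simp only [Option.getD_some]
  set t : List Int := [cnt chords 1, cnt chords 2, cnt chords 3, cnt chords 4,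
    cnt chords 5, cnt chords 6, cnt chords 7] with ht
  set c0 : Int := cnt chords 0 with hc0
  have hle : c0 ≤ t.foldl max c0 := le_foldl_max' t c0
  have hf : (if t.foldl max c0 > c0
        then 1 + (((PySem.List.index? t (t.foldl max c0)).getD 0 : Nat) : Int)
        else (0 : Int))
      = (((PySem.List.index? (c0 :: t) (t.foldl max c0)).getD 0 : Nat) : Int) := by
    by_cases hM : t.foldl max c0 > c0
    · rw [if_pos hM, PySem.List.index?_cons_of_ne t (show c0 ≠ t.foldl max c0 from by omega)]
      have hmem : t.foldl max c0 ∈ t := by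
        rcases foldl_max_mem t c0 with h | h
        · omega
        · exact h
      obtain ⟨n, hn⟩ := Option.isSome_iff_exists.mp
        ((PySem.List.index?_isSome_iff t _).mpr hmem)
      rw [hn]
      simp only [Option.map_some, Option.getD_some]
      omega
    · rw [if_neg hM, show t.foldl max c0 = c0 from by omega, PySem.List.index?_cons_self]
      simp
  rw [hf]

-- ===== VERDICT (by name: the statement is the Claim_ definition above) =====
theorem best_capo_spec : Claim_equal_best_capo := by
  intro chords _
  unfold Spec_best_capo
  exact best_capo_eq_alt chords
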